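-- pv_equiv track=rewrite | github.com/here0009/LeetCode | 2024/2218_MaximumValueofKCoinsFromPiles.py | maxValueOfCoins
-- ===== SOURCE A (Python) =====
-- from typing import List,Tuple
--
-- def maxValueOfCoins(piles: List[List[int]], k: int) -> int:
--     dp = [0]*(k+1)
--     for pile_lst in piles:
--         for i in range(1, len(pile_lst)):
--             pile_lst[i] += pile_lst[i - 1] # presum
--         dp2 = [0]*(k+1)
--         for j in range(1, k+1):
--             min_len = min(len(pile_lst), j)
--             dp2[j] = max([dp[j-w]+v for w,v in enumerate(pile_lst[:min_len], 1)] + [dp[j]])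
--         dp = dp2
--     return dp[-1]
-- ===== SOURCE B (Python) =====
-- def maxValueOfCoins(piles, k):
--     # same in-place prefix-sum transform of every pile as the original
--     for pile in piles:
--         for i in range(1, len(pile)):
--             pile[i] += pile[i - 1]
--     memo = {}
--
--     def dp(i, rem):
--         if i == len(piles) or rem == 0:
--             return 0
--         key = (i, rem)
--         if key in memo:
--             return memo[key]
--         pile = piles[i]
--         best = dp(i + 1, rem)
--         for t in range(1, min(len(pile), rem) + 1):
--             best = max(best, pile[t - 1] + dp(i + 1, rem - t))
--         memo[key] = best
--         return best
--
--     return dp(0, k)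
-- ===== Notes on version B (the rewrite author's own statement) =====
-- stated objective: alternative
-- what changed: Replaces A's bottom-up rolling-array DP over budgets (two k+1 arrays rebuilt per pile) with a top-down memoized recursion dp(i, rem) over (pile index, remaining budget), keeping A's in-place prefix-sum transform of every pile.
import Mathlib
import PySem

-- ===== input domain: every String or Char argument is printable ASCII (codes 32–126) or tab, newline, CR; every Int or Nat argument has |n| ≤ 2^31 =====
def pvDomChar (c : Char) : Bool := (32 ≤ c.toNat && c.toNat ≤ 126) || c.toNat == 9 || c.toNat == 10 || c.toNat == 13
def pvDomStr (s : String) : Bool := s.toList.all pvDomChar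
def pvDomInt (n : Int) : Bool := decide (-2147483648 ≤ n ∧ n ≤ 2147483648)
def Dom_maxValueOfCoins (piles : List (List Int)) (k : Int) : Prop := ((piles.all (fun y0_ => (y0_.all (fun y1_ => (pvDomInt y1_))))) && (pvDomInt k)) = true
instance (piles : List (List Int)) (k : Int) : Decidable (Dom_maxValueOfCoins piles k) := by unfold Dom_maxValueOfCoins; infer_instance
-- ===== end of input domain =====

-- B is a top-down memoized recursion over (pile index, remaining budget) instead of A's
-- bottom-up rolling arrays over budgets; equivalence is about the RETURN value only
-- (the Python A mutates each pile into its prefix sums in place; the Python B performs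
-- the same mutation).

-- ===== PORT A =====
-- in-place loop 'for i in range(1, len(pile)): pile[i] += pile[i-1]' as a running-sum rebuild
def presumGo (acc : Int) : List Int → List Int
  | [] => []
  | y :: ys => (acc + y) :: presumGo (acc + y) ys

def presum : List Int → List Int
  | [] => []
  | x :: xs => x :: presumGo x xs

-- Python's max over the nonempty list (candidates + [dp[j]]); folded from dp[j], same value
def pvMaxList (init : Int) (l : List Int) : Int := l.foldl max init

-- one pile's pass: dp2[0] = 0, dp2[j] = max([dp[j-w]+v for w,v in enumerate(pile[:min_len],1)] + [dp[j]])
def stepA (K : Nat) (dp : List Int) (pile : List Int) : List Int :=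
  (List.range K).map (fun j =>
    if j = 0 then (0 : Int)
    else
      let minLen := min pile.length j
      pvMaxList (dp.getD j 0)
        ((List.range minLen).map (fun w0 => dp.getD (j - (w0 + 1)) 0 + pile.getD w0 0)))

def maxValueOfCoins (piles : List (List Int)) (k : Int) : Int :=
  let K := (k + 1).toNat        -- [0]*(k+1); empty when k < 0, as in Python
  let dp := piles.foldl (fun dp pile => stepA K dp (presum pile)) (List.replicate K 0)
  (PySem.List.pyGet? dp (-1)).getD 0   -- dp[-1]; none (IndexError) only when k < 0, outside Pre_

-- ===== PORT B =====
-- dp(i, rem) with dict memo, threaded through; first component = return value, second = memo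
def goB : List (List Int) → Int → Int → PySem.Dict (Int × Int) Int → Int × PySem.Dict (Int × Int) Int
  | [], _, _, memo => (0, memo)                 -- i == len(piles)
  | p :: rest, i, rem, memo =>
    if rem = 0 then (0, memo)
    else
      match memo.get? (i, rem) with
      | some v => (v, memo)
      | none =>
        let s0 := goB rest (i + 1) rem memo     -- best = dp(i+1, rem)
        let s1 := (List.range (min p.length rem.toNat)).foldl
          (fun s (t0 : Nat) =>
            let r := goB rest (i + 1) (rem - ((t0 : Int) + 1)) s.2
            (max s.1 (p.getD t0 0 + r.1), r.2)) s0
        (s1.1, s1.2.insert (i, rem) s1.1)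

def maxValueOfCoins_alt (piles : List (List Int)) (k : Int) : Int :=
  (goB (piles.map presum) 0 k PySem.Dict.empty).1

-- ===== PRECONDITION & SPEC =====
-- A raises IndexError (dp[-1] on the empty array [0]*(k+1)) exactly when k < 0
def Pre_maxValueOfCoins (piles : List (List Int)) (k : Int) : Prop := 0 ≤ k
instance (piles : List (List Int)) (k : Int) : Decidable (Pre_maxValueOfCoins piles k) := by
  unfold Pre_maxValueOfCoins; infer_instance

def pvWitness_maxValueOfCoins : List (List Int) × Int := ([[1, 2], [3]], 2)

def Spec_maxValueOfCoins (piles : List (List Int)) (k : Int) (out : Int) : Prop := out = maxValueOfCoins_alt piles k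
instance (piles : List (List Int)) (k : Int) (out : Int) : Decidable (Spec_maxValueOfCoins piles k out) := by unfold Spec_maxValueOfCoins; infer_instance

-- ===== CLAIM (what is proved, stated in full; the proofs are below) =====
def Claim_equal_maxValueOfCoins : Prop := ∀ (piles : List (List Int)) (k : Int), Dom_maxValueOfCoins piles k → Pre_maxValueOfCoins piles k → Spec_maxValueOfCoins piles k (maxValueOfCoins piles k)


-- ===== LEMMAS AND PROOFS =====

-- the common value specification: best total over the (prefix-summed) piles with budget j
def maxOver (f : Nat → Int) : Nat → Int
  | 0 => f 0
  | n + 1 => max (maxOver f n) (f (n + 1))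

def valq (q : List Int) (w : Nat) : Int := if w = 0 then 0 else q.getD (w - 1) 0

def bestS : List (List Int) → Nat → Int
  | [], _ => 0
  | q :: qs, j => maxOver (fun w => valq q w + bestS qs (j - w)) (min q.length j)

theorem bestS_zero : ∀ (l : List (List Int)), bestS l 0 = 0
  | [] => rfl
  | q :: qs => by simp [bestS, maxOver, valq, bestS_zero qs]

theorem maxOver_eq_foldl (g : Nat → Int) (m : Nat) :
    maxOver g m = (List.range m).foldl (fun a w0 => max a (g (w0 + 1))) (g 0) := by
  induction m with
  | zero => rfl
  | succ n ih => rw [maxOver, List.range_succ, List.foldl_append, ← ih]; rfl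

theorem le_maxOver (f : Nat → Int) (n w : Nat) (h : w ≤ n) : f w ≤ maxOver f n := by
  induction n with
  | zero => interval_cases w; exact le_refl _
  | succ n ih =>
    rcases Nat.lt_or_ge w (n + 1) with h' | h'
    · exact le_trans (ih (by omega)) (le_max_left _ _)
    · have : w = n + 1 := by omega
      subst this; exact le_max_right _ _

theorem maxOver_le (f : Nat → Int) (n : Nat) (c : Int) (h : ∀ w ≤ n, f w ≤ c) : maxOver f n ≤ c := by
  induction n with
  | zero => exact h 0 le_rfl
  | succ n ih => exact max_le (ih fun w hw => h w (by omega)) (h (n + 1) le_rfl)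

theorem maxOver_congr (f g : Nat → Int) (n : Nat) (h : ∀ w ≤ n, f w = g w) :
    maxOver f n = maxOver g n := by
  induction n with
  | zero => exact h 0 le_rfl
  | succ n ih => rw [maxOver, maxOver, ih fun w hw => h w (by omega), h (n + 1) le_rfl]

theorem add_maxOver (c : Int) (f : Nat → Int) (n : Nat) :
    c + maxOver f n = maxOver (fun w => c + f w) n := by
  induction n with
  | zero => rfl
  | succ n ih => rw [maxOver, maxOver, ← ih, ← max_add_add_left]

theorem bestS_cons_cons (p q : List Int) (l : List (List Int)) (j : Nat) :
    bestS (p :: q :: l) j =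
      maxOver (fun w1 => maxOver (fun w2 => valq p w1 + (valq q w2 + bestS l (j - w1 - w2)))
        (min q.length (j - w1))) (min p.length j) := by
  simp only [bestS]
  exact maxOver_congr _ _ _ (fun w1 _ => add_maxOver _ _ _)

theorem bestS_swap_le (p q : List Int) (l : List (List Int)) (j : Nat) :
    bestS (p :: q :: l) j ≤ bestS (q :: p :: l) j := by
  rw [bestS_cons_cons, bestS_cons_cons]
  apply maxOver_le
  intro w1 hw1
  apply maxOver_le
  intro w2 hw2
  have h1 : w1 ≤ min p.length j := hw1
  have h2 : w2 ≤ min q.length (j - w1) := hw2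
  have hsub : j - w1 - w2 = j - w2 - w1 := by omega
  calc valq p w1 + (valq q w2 + bestS l (j - w1 - w2))
      = valq q w2 + (valq p w1 + bestS l (j - w2 - w1)) := by rw [hsub]; ring
    _ ≤ maxOver (fun w1' => valq q w2 + (valq p w1' + bestS l (j - w2 - w1')))
          (min p.length (j - w2)) := le_maxOver _ _ w1 (by omega)
    _ ≤ _ := le_maxOver _ _ w2 (by omega)

theorem bestS_swap (p q : List Int) (l : List (List Int)) (j : Nat) :
    bestS (p :: q :: l) j = bestS (q :: p :: l) j :=
  le_antisymm (bestS_swap_le p q l j) (bestS_swap_le q p l j)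

theorem bestS_perm {l1 l2 : List (List Int)} (h : l1.Perm l2) : ∀ j, bestS l1 j = bestS l2 j := by
  induction h with
  | nil => intro _; rfl
  | cons x _ ih =>
    intro j
    simp only [bestS]
    exact maxOver_congr _ _ _ (fun w _ => by rw [ih])
  | swap x y l => intro j; exact bestS_swap y x l j
  | trans _ _ ih1 ih2 => intro j; rw [ih1, ih2]

-- ===== A-side =====

theorem getD_map_range (K : Nat) (f : Nat → Int) (j : Nat) (hj : j < K) :
    ((List.range K).map f).getD j 0 = f j := by
  simp [List.getD, List.getElem?_map, List.getElem?_range, hj]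

theorem getD_replicate_zero (K j : Nat) : (List.replicate K (0 : Int)).getD j 0 = 0 := by
  rcases Nat.lt_or_ge j K with h | h <;>
    simp [List.getD, List.getElem?_replicate, h, Nat.not_lt.2, Nat.le_of_lt]

theorem stepA_correct (K : Nat) (dp q : List Int) (acc : List (List Int))
    (hdp : ∀ j < K, dp.getD j 0 = bestS acc j) :
    (stepA K dp q).length = K ∧ ∀ j < K, (stepA K dp q).getD j 0 = bestS (q :: acc) j := by
  refine ⟨by simp [stepA], ?_⟩
  intro j hj
  rw [stepA, getD_map_range _ _ j hj]
  by_cases hj0 : j = 0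
  · subst hj0; rw [if_pos rfl, bestS_zero]
  · rw [if_neg hj0]
    show pvMaxList (dp.getD j 0)
      ((List.range (min q.length j)).map (fun w0 => dp.getD (j - (w0 + 1)) 0 + q.getD w0 0)) = _
    unfold pvMaxList
    rw [List.foldl_map]
    have hbase : dp.getD j 0 = valq q 0 + bestS acc (j - 0) := by
      simp [valq]; exact hdp j hj
    rw [show bestS (q :: acc) j
        = maxOver (fun w => valq q w + bestS acc (j - w)) (min q.length j) from rfl,
      maxOver_eq_foldl]
    beta_reduce
    rw [← hbase]
    apply PySem.List.foldl_congr_mem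
    intro a w0 hw0
    congr 1
    rw [hdp (j - (w0 + 1)) (by omega)]
    simp only [valq, Nat.add_sub_cancel, if_neg (Nat.succ_ne_zero w0)]
    ring

theorem foldA (K : Nat) (L : List (List Int)) :
    ∀ (acc : List (List Int)) (dp : List Int),
      (∀ j < K, dp.getD j 0 = bestS acc j) →
      (∀ j < K, (L.foldl (fun dp p => stepA K dp (presum p)) dp).getD j 0
        = bestS ((L.map presum).reverse ++ acc) j) := by
  induction L with
  | nil => intro acc dp hdp j hj; simpa using hdp j hj
  | cons p L ih =>
    intro acc dp hdp j hj
    have hstep := stepA_correct K dp (presum p) acc hdp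
    have := ih (presum p :: acc) (stepA K dp (presum p)) hstep.2 j hj
    simp only [List.foldl_cons]
    rw [this]
    congr 1
    simp

theorem foldA_length (K : Nat) (L : List (List Int)) (dp : List Int) (h : dp.length = K) :
    (L.foldl (fun dp p => stepA K dp (presum p)) dp).length = K := by
  induction L generalizing dp with
  | nil => exact h
  | cons p L ih => exact ih _ (by simp [stepA])

theorem A_eq_bestS (piles : List (List Int)) (k : Int) (hk : 0 ≤ k) :
    maxValueOfCoins piles k = bestS (piles.map presum) k.toNat := by
  show (PySem.List.pyGet? (piles.foldl (fun dp pile => stepA ((k + 1).toNat) dp (presum pile))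
      (List.replicate ((k + 1).toNat) 0)) (-1)).getD 0 = _
  set K := (k + 1).toNat with hKdef
  set dpf := piles.foldl (fun dp pile => stepA K dp (presum pile)) (List.replicate K 0) with hdpf
  have hlen : dpf.length = K := foldA_length K piles _ (by simp)
  have hval := foldA K piles [] (List.replicate K 0)
    (fun j hj => by rw [getD_replicate_zero]; rfl)
  rw [PySem.List.pyGet?_neg_one, List.getLast?_eq_getElem?, hlen]
  have hKpos : K - 1 < K := by omega
  have hgetD : dpf[K - 1]?.getD 0 = dpf.getD (K - 1) 0 := (List.getD_eq_getElem?_getD).symm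
  rw [hgetD, hval (K - 1) hKpos, show K - 1 = k.toNat from by omega]
  simp only [List.append_nil]
  exact bestS_perm (List.reverse_perm _) k.toNat

-- ===== B-side =====

def InvB (Q : List (List Int)) (memo : PySem.Dict (Int × Int) Int) : Prop :=
  ∀ i rem v, memo.get? (i, rem) = some v → v = bestS (Q.drop i.toNat) rem.toNat

theorem goB_correct (Q : List (List Int)) :
    ∀ (suffix : List (List Int)) (i rem : Int) (memo : PySem.Dict (Int × Int) Int),
      suffix = Q.drop i.toNat → 0 ≤ i → 0 ≤ rem → InvB Q memo →
      (goB suffix i rem memo).1 = bestS suffix rem.toNat ∧ InvB Q (goB suffix i rem memo).2 := by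
  intro suffix
  induction suffix with
  | nil =>
    intro i rem memo hsuf hi hrem hinv
    exact ⟨(bestS_zero []).symm, hinv⟩
  | cons p rest ih =>
    intro i rem memo hsuf hi hrem hinv
    have hrest : rest = Q.drop (i + 1).toNat := by
      have h1 : (i + 1).toNat = i.toNat + 1 := by omega
      rw [h1, ← List.tail_drop, ← hsuf]
      rfl
    by_cases h0 : rem = 0
    · subst h0
      simp only [goB, if_pos rfl]
      exact ⟨(bestS_zero _).symm, hinv⟩
    · rcases hmem : memo.get? (i, rem) with _ | v
      · -- memo miss
        have hs0 := ih (i + 1) rem memo hrest (by omega) hrem hinv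
        set m := min p.length rem.toNat with hm
        have haux : ∀ (ts : List Nat), (∀ t0 ∈ ts, (t0 : Int) + 1 ≤ rem) →
            ∀ (b : Int) (memo' : PySem.Dict (Int × Int) Int), InvB Q memo' →
            (ts.foldl (fun s (t0 : Nat) =>
                (max s.1 (p.getD t0 0 + (goB rest (i + 1) (rem - ((t0 : Int) + 1)) s.2).1),
                  (goB rest (i + 1) (rem - ((t0 : Int) + 1)) s.2).2)) (b, memo')).1
              = ts.foldl (fun a t0 => max a (p.getD t0 0 + bestS rest (rem - ((t0 : Int) + 1)).toNat)) b ∧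
            InvB Q (ts.foldl (fun s (t0 : Nat) =>
                (max s.1 (p.getD t0 0 + (goB rest (i + 1) (rem - ((t0 : Int) + 1)) s.2).1),
                  (goB rest (i + 1) (rem - ((t0 : Int) + 1)) s.2).2)) (b, memo')).2 := by
          intro ts
          induction ts with
          | nil => intro _ b memo' hinv'; exact ⟨rfl, hinv'⟩
          | cons t0 ts ihts =>
            intro hts b memo' hinv'
            have hr := ih (i + 1) (rem - ((t0 : Int) + 1)) memo' hrest (by omega)
              (by have := hts t0 List.mem_cons_self; omega) hinv'
            simp only [List.foldl_cons]
            have hnext := ihts (fun t ht => hts t (List.mem_cons_of_mem _ ht))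
              (max b (p.getD t0 0 + (goB rest (i + 1) (rem - ((t0 : Int) + 1)) memo').1))
              (goB rest (i + 1) (rem - ((t0 : Int) + 1)) memo').2 hr.2
            rw [hr.1] at hnext ⊢
            exact hnext
        have heta : goB rest (i + 1) rem memo
            = ((goB rest (i + 1) rem memo).1, (goB rest (i + 1) rem memo).2) := rfl
        have hfold := haux (List.range m)
          (fun t0 ht => by rw [List.mem_range] at ht; omega)
          (goB rest (i + 1) rem memo).1 (goB rest (i + 1) rem memo).2 hs0.2
        have hmain : ((List.range m).foldl (fun s (t0 : Nat) =>
            (max s.1 (p.getD t0 0 + (goB rest (i + 1) (rem - ((t0 : Int) + 1)) s.2).1),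
              (goB rest (i + 1) (rem - ((t0 : Int) + 1)) s.2).2)) (goB rest (i + 1) rem memo)).1
            = bestS (p :: rest) rem.toNat := by
          rw [heta, hfold.1, hs0.1]
          rw [show bestS (p :: rest) rem.toNat
              = maxOver (fun w => valq p w + bestS rest (rem.toNat - w)) (min p.length rem.toNat) from rfl,
            maxOver_eq_foldl]
          beta_reduce
          have hbase : valq p 0 + bestS rest (rem.toNat - 0) = bestS rest rem.toNat := by simp [valq]
          rw [hbase, ← hm]
          symm
          apply PySem.List.foldl_congr_mem
          intro a w0 hw0
          rw [List.mem_range] at hw0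
          have ht : (rem - ((w0 : Int) + 1)).toNat = rem.toNat - (w0 + 1) := by omega
          simp only [valq, Nat.add_sub_cancel, if_neg (Nat.succ_ne_zero w0), ht]
        simp only [goB, if_neg h0, hmem]
        refine ⟨hmain, ?_⟩
        intro i' r' v' hv'
        rw [PySem.Dict.get?_insert] at hv'
        split at hv'
        · rename_i heq
          rw [Prod.ext_iff] at heq
          obtain ⟨hi', hr'⟩ := heq
          simp only at hi' hr'
          subst hi'; subst hr'
          rw [← hsuf]
          have hv'' := Option.some.inj hv'
          rw [← hv'']
          exact hmain
        · rw [heta] at hv'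
          exact hfold.2 i' r' v' hv'
      · -- memo hit
        simp only [goB, if_neg h0, hmem]
        have hv := hinv i rem v hmem
        rw [← hsuf] at hv
        exact ⟨hv, hinv⟩

theorem B_eq_bestS (piles : List (List Int)) (k : Int) (hk : 0 ≤ k) :
    maxValueOfCoins_alt piles k = bestS (piles.map presum) k.toNat := by
  unfold maxValueOfCoins_alt
  exact (goB_correct (piles.map presum) (piles.map presum) 0 k PySem.Dict.empty
    (by simp) le_rfl hk (fun i r v h => by simp [PySem.Dict.get?_empty] at h)).1

-- ===== VERDICT (by name: the statement is the Claim_ definition above) =====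
theorem maxValueOfCoins_spec : Claim_equal_maxValueOfCoins := by
  intro piles k _ hk
  unfold Spec_maxValueOfCoins
  rw [A_eq_bestS piles k hk, B_eq_bestS piles k hk]
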